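-- pv_equiv track=rewrite | github.com/scicluna/algopractice | katas/6k/firstbad.py | firstbad
-- ===== SOURCE A (Python) =====
-- def firstbad(array:list[bool])->int:
--     left, right = 0, len(array)-1
--     while left <= right:
--         mid = (left+right)//2
--         if array[mid]:
--             right = mid-1
--         else:
--             left = mid+1
--     return left
-- ===== SOURCE B (Python) =====
-- def firstbad(array: list[bool]) -> int:
--     def go(offset: int, sub: list[bool]) -> int:
--         if not sub:
--             return offset
--         mid = (len(sub) - 1) // 2
--         if sub[mid]:
--             return go(offset, sub[:mid])
--         else:
--             return go(offset + mid + 1, sub[mid + 1:])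
--     return go(0, array)
-- ===== Notes on version B (the rewrite author's own statement) =====
-- stated objective: alternative
-- what changed: The iterative index-bound binary search (left/right cursors mutated in a while loop) is replaced by a divide-and-conquer recursion on list slices: go(offset, sub) picks mid=(len(sub)-1)//2 and recurses on sub[:mid] or sub[mid+1:] with an offset accumulator.
import Mathlib
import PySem

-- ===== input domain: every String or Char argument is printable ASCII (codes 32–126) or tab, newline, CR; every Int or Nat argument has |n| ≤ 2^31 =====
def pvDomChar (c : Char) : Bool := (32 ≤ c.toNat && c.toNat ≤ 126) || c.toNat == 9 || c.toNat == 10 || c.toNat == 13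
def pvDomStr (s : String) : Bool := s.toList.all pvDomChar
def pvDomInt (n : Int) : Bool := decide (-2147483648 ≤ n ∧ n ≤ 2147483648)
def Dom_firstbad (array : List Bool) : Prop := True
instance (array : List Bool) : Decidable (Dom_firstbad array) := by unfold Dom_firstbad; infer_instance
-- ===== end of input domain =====

-- B replaces A's index-bound binary search by a divide-and-conquer recursion on list slices with an offset accumulator; same values, no speed claim.


-- ===== PORT A =====
-- while left <= right: mid = (left+right)//2; if array[mid]: right = mid-1 else: left = mid+1; return left
-- (fuel only makes the loop structurally recursive; fuel = len+1 is proved sufficient below, so it is never exhausted)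
def firstbadLoop (array : List Bool) : Nat → Int → Int → Int
  | 0, left, _ => left
  | fuel + 1, left, right =>
    if left ≤ right then
      let mid := PySem.Int.floordiv (left + right) 2
      if PySem.List.pyGetD array mid false then
        firstbadLoop array fuel left (mid - 1)
      else
        firstbadLoop array fuel (mid + 1) right
    else left

def firstbad (array : List Bool) : Int :=
  firstbadLoop array (array.length + 1) 0 ((array.length : Int) - 1)

-- ===== PORT B =====
-- go(offset, sub): empty slice → offset; mid = (len(sub)-1)//2; recurse on sub[:mid] or, with offset moved past mid, on sub[mid+1:]
def firstbadGo (offset : Int) (sub : List Bool) : Int :=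
  if sub.isEmpty then offset
  else
    let mid := PySem.Int.floordiv (PySem.List.len sub - 1) 2
    if PySem.List.pyGetD sub mid false then
      firstbadGo offset (PySem.List.slice sub none (some mid))
    else
      firstbadGo (offset + mid + 1) (PySem.List.slice sub (some (mid + 1)) none)
termination_by sub.length
decreasing_by
  · have h1 : 1 ≤ sub.length := by
      cases sub <;> simp_all
    have hb := PySem.Int.floordiv_two_mid_bounds (lo := 0) (hi := (sub.length : Int) - 1) (by omega)
    simp only [zero_add] at hb
    simp only [PySem.List.len_eq]
    rw [PySem.List.slice_to sub hb.1]
    simp only [List.length_take]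
    omega
  · have h1 : 1 ≤ sub.length := by
      cases sub <;> simp_all
    have hb := PySem.Int.floordiv_two_mid_bounds (lo := 0) (hi := (sub.length : Int) - 1) (by omega)
    simp only [zero_add] at hb
    simp only [PySem.List.len_eq]
    rw [PySem.List.slice_from sub (by omega)]
    simp only [List.length_drop]
    omega

def firstbad_alt (array : List Bool) : Int :=
  firstbadGo 0 array

-- ===== PRECONDITION & SPEC =====
def Spec_firstbad (array : List Bool) (out : Int) : Prop := out = firstbad_alt array
instance (array : List Bool) (out : Int) : Decidable (Spec_firstbad array out) := by unfold Spec_firstbad; infer_instance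

-- ===== CLAIM (what is proved, stated in full; the proofs are below) =====
def Claim_equal_firstbad : Prop := ∀ (array : List Bool), Dom_firstbad array → Spec_firstbad array (firstbad array)

-- ===== LEMMAS AND PROOFS =====
theorem firstbadLoop_eq_go (arr : List Bool) (fuel : Nat) :
    ∀ (left right : Int), 0 ≤ left → right < (arr.length : Int) →
    (right + 1 - left).toNat + 1 ≤ fuel →
    firstbadLoop arr fuel left right
      = firstbadGo left ((arr.drop left.toNat).take (right + 1 - left).toNat) := by
  induction fuel with
  | zero => intro left right _ _ hf; omega
  | succ fuel ih =>
    intro left right h0 h1 hf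
    by_cases hlr : left ≤ right
    · obtain ⟨n, hn⟩ : ∃ n : ℕ, (n : Int) = right + 1 - left := ⟨(right + 1 - left).toNat, by omega⟩
      have hn_def : (right + 1 - left).toNat = n := by omega
      rw [hn_def]
      have hn1 : 1 ≤ n := by omega
      have hsub : ((arr.drop left.toNat).take n).length = n := by
        simp only [List.length_take, List.length_drop]
        omega
      have hbB := PySem.Int.floordiv_two_mid_bounds (lo := 0) (hi := (n : Int) - 1) (by omega)
      simp only [zero_add] at hbB
      have hbA := PySem.Int.floordiv_two_mid_bounds (lo := left) (hi := right) hlr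
      have hmid : PySem.Int.floordiv (left + right) 2
          = left + PySem.Int.floordiv ((n : Int) - 1) 2 := by
        rw [PySem.Int.floordiv_eq_ediv_of_pos (by omega),
            PySem.Int.floordiv_eq_ediv_of_pos (by omega)]
        have he : left + right = ((n : Int) - 1) + left * 2 := by omega
        rw [he, Int.add_mul_ediv_right _ _ (by norm_num : (2:Int) ≠ 0)]
        ring
      have hget : PySem.List.pyGetD arr (PySem.Int.floordiv (left + right) 2) false
          = PySem.List.pyGetD ((arr.drop left.toNat).take n)
              (PySem.Int.floordiv ((n : Int) - 1) 2) false := by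
        rw [PySem.List.pyGetD_eq_getElem arr false (by omega) (by omega),
            PySem.List.pyGetD_eq_getElem ((arr.drop left.toNat).take n) false hbB.1
              (by rw [hsub]; omega)]
        simp only [List.getElem_take, List.getElem_drop]
        congr 1
        omega
      rw [firstbadGo]
      have hne : ((arr.drop left.toNat).take n).isEmpty = false := by
        rw [List.isEmpty_eq_false_iff, ← List.length_pos_iff, hsub]; omega
      simp only [hne, Bool.false_eq_true, if_false, PySem.List.len_eq, hsub]
      simp only [firstbadLoop, if_pos hlr, ← hget]
      obtain ⟨mA, hmA⟩ : ∃ m : ℤ, PySem.Int.floordiv (left + right) 2 = m := ⟨_, rfl⟩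
      obtain ⟨mB, hmB⟩ : ∃ m : ℤ, PySem.Int.floordiv ((n : Int) - 1) 2 = m := ⟨_, rfl⟩
      rw [hmA] at hbA hmid ⊢
      rw [hmB] at hbB hmid ⊢
      have hfA : (mA - 1 + 1 - left).toNat + 1 ≤ fuel := by omega
      have hfB : (right + 1 - (mA + 1)).toNat + 1 ≤ fuel := by omega
      split
      · rw [ih left (mA - 1) h0 (by omega) hfA]
        congr 1
        rw [PySem.List.slice_to _ hbB.1, List.take_take]
        congr 1
        omega
      · rw [ih (mA + 1) right (by omega) h1 hfB]
        rw [PySem.List.slice_from _ (by omega), List.drop_take, List.drop_drop]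
        congr 2
        all_goals try omega
        congr 1
        omega
    · have hn0 : (right + 1 - left).toNat = 0 := by omega
      rw [hn0]
      simp only [List.take_zero, firstbadLoop, if_neg hlr]
      rw [firstbadGo]
      simp

-- ===== VERDICT (by name: the statement is the Claim_ definition above) =====
theorem firstbad_spec : Claim_equal_firstbad := by
  intro array _
  unfold Spec_firstbad firstbad firstbad_alt
  have h := firstbadLoop_eq_go array (array.length + 1) 0 ((array.length : Int) - 1)
    le_rfl (by omega) (by omega)
  simpa using h
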